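-- pv_equiv track=rewrite | github.com/SvyatoslavDrozdov/algorithms | yandex_algorithm_training_3/contest/5_good_string.py | calculate_max_wellness_of_string
-- ===== SOURCE A (Python) =====
-- def calculate_max_wellness_of_string(alphabet_size: int, letters_count_input: list[int]) -> int:
--     letters_count: list[int] = letters_count_input.copy()
--     sorted_letters_count: list[int] = list(set(letters_count))
--     sorted_letters_count.sort()
--
--     information_matrix: list[list[int]] = []
--     layer_high_list: list[int] = []
--
--     previous_high: int = 0
--     for high in sorted_letters_count:
--         layer_high: int = high - previous_high
--         layer_high_list.append(layer_high)
--         previous_high = high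
--
--         layer_information_matrix_raw: list[int] = []
--         for idx in range(alphabet_size):
--             if letters_count[idx] > 0:
--                 layer_information_matrix_raw.append(1)
--             else:
--                 layer_information_matrix_raw.append(0)
--         information_matrix.append(layer_information_matrix_raw)
--
--         for idx in range(alphabet_size):
--             letters_count[idx] -= layer_high
--
--     wellness: int = 0
--
--     for idx in range(len(information_matrix)):
--         units_in_raw: int = 0
--         for number in information_matrix[idx]:
--             if number:
--                 units_in_raw += 1
--             else:
--                 if units_in_raw >= 1:
--                     wellness += layer_high_list[idx] * (units_in_raw - 1)
--                 units_in_raw = 0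
--         if units_in_raw >= 1:
--             wellness += layer_high_list[idx] * (units_in_raw - 1)
--
--     return wellness
-- ===== SOURCE B (Python) =====
-- def calculate_max_wellness_of_string(alphabet_size: int, letters_count_input: list[int]) -> int:
--     if alphabet_size < 2:
--         return 0  # fewer than two letters: no adjacent pair exists
--     counts = letters_count_input[:alphabet_size]
--     minima = sorted(min(left, right) for left, right in zip(counts, counts[1:]))
--
--     def pairs_above(level: int) -> int:
--         lo, hi = 0, len(minima)
--         while lo < hi:
--             mid = (lo + hi) // 2
--             if minima[mid] <= level:
--                 lo = mid + 1
--             else: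
--                 hi = mid
--         return len(minima) - lo
--
--     wellness = 0
--     previous = 0
--     for value in sorted(set(letters_count_input)):
--         wellness += (value - previous) * pairs_above(previous)
--         previous = value
--     return wellness
-- ===== Notes on version B (the rewrite author's own statement) =====
-- stated objective: faster
-- what changed: Replaces the layered histogram construction (one 0/1 matrix row plus a full-array subtraction over the counts per distinct value, then a run-length rescan of every row) by sorting the adjacent-pair minima once and, per distinct value, counting the pairs still above the level with a binary search; Pre_ excludes only the inputs on which A raises IndexError (a nonempty list shorter than alphabet_size, with alphabet_size >= 2).
import Mathlib
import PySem

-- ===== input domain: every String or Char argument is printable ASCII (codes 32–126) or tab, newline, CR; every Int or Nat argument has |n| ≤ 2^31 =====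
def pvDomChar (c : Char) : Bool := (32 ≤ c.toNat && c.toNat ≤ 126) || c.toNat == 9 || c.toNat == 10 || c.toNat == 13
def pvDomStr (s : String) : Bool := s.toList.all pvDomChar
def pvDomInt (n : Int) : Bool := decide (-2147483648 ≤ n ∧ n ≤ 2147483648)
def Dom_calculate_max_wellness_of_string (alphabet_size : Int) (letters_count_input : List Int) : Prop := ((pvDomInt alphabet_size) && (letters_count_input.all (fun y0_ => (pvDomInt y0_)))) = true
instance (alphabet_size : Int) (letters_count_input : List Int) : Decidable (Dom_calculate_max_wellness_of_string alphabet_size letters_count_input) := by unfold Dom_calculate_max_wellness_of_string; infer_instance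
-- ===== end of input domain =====

-- B replaces A's layered histogram (one 0/1 row + full-array subtraction per distinct value,
-- then a run-length rescan of every row) by sorting the adjacent-pair minima once and counting
-- the pairs above each level with a binary search; equivalence is claimed on Pre_.

-- ===== PORT A =====
def calculate_max_wellness_of_string (alphabet_size : Int) (letters_count_input : List Int) : Int :=
  let letters_count := letters_count_input
  let sorted_letters_count :=
    PySem.List.sorted (PySem.Set.ofList letters_count) (fun x => x) false
  let st := sorted_letters_count.foldl
    (fun (s : List Int × List (List Int) × List Int × Int) high =>
      let layer_high := high - s.2.2.2
      let row := (PySem.List.pyRange 0 alphabet_size 1).map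
        (fun idx => if PySem.List.pyGetD s.1 idx 0 > 0 then (1 : Int) else 0)
      let lc' := (PySem.List.pyRange 0 alphabet_size 1).foldl
        (fun l idx => PySem.List.pySetD l idx (PySem.List.pyGetD l idx 0 - layer_high)) s.1
      (lc', s.2.1 ++ [row], s.2.2.1 ++ [layer_high], high))
    (letters_count, ([] : List (List Int)), ([] : List Int), (0 : Int))
  let information_matrix := st.2.1
  let layer_high_list := st.2.2.1
  (PySem.List.pyRange 0 (information_matrix.length : Int) 1).foldl
    (fun wellness idx =>
      let row := PySem.List.pyGetD information_matrix idx []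
      let h := PySem.List.pyGetD layer_high_list idx 0
      let p := row.foldl
        (fun (uw : Int × Int) number =>
          if number ≠ 0 then (uw.1 + 1, uw.2)
          else (0, if uw.1 ≥ 1 then uw.2 + h * (uw.1 - 1) else uw.2))
        ((0 : Int), wellness)
      if p.1 ≥ 1 then p.2 + h * (p.1 - 1) else p.2)
    0

-- ===== PORT B =====
-- B-side helper: the hand-written binary search of Source B (first index in [lo, hi) whose
-- element exceeds level, one halving step per call).
def pvBisect (minima : List Int) (level : Int) (lo hi : Int) : Int :=
  if h : lo < hi then
    let mid := PySem.Int.floordiv (lo + hi) 2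
    if PySem.List.pyGetD minima mid 0 ≤ level then pvBisect minima level (mid + 1) hi
    else pvBisect minima level lo mid
  else lo
termination_by (hi - lo).toNat
decreasing_by
  all_goals
    have hb := PySem.Int.floordiv_two_mid_bounds (le_of_lt h)
    have hlt : PySem.Int.floordiv (lo + hi) 2 < hi :=
      (PySem.Int.floordiv_lt_iff_lt_mul (by omega)).2 (by omega)
    omega

def calculate_max_wellness_of_string_alt (alphabet_size : Int) (letters_count_input : List Int) : Int :=
  if alphabet_size < 2 then 0 else  -- fewer than two letters: no adjacent pair exists
  let counts := PySem.List.slice letters_count_input none (some alphabet_size)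
  let minima := PySem.List.sorted
    ((counts.zip (PySem.List.slice counts (some 1) none)).map (fun pr => min pr.1 pr.2))
    (fun x => x) false
  ((PySem.List.sorted (PySem.Set.ofList letters_count_input) (fun x => x) false).foldl
    (fun (s : Int × Int) value =>
      (s.1 + (value - s.2) * ((minima.length : Int) - pvBisect minima s.2 0 (minima.length : Int)),
       value))
    (0, 0)).1

-- ===== PRECONDITION & SPEC =====
-- Pre_ excludes exactly the inputs on which A raises IndexError: a nonempty list shorter
-- than alphabet_size with alphabet_size ≥ 2 (the loop indexes letters_count[idx] for
-- idx < alphabet_size; with alphabet_size < 2 or an empty list no layer indexes out of range).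
def Pre_calculate_max_wellness_of_string (alphabet_size : Int) (letters_count_input : List Int) : Prop :=
  alphabet_size < 2
  ∨ alphabet_size ≤ (letters_count_input.length : Int)
  ∨ letters_count_input = []
instance (alphabet_size : Int) (letters_count_input : List Int) : Decidable (Pre_calculate_max_wellness_of_string alphabet_size letters_count_input) := by unfold Pre_calculate_max_wellness_of_string; infer_instance
def pvWitness_calculate_max_wellness_of_string : Int × List Int := (3, [3, 1, 2])

def Spec_calculate_max_wellness_of_string (alphabet_size : Int) (letters_count_input : List Int) (out : Int) : Prop := out = calculate_max_wellness_of_string_alt alphabet_size letters_count_input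
instance (alphabet_size : Int) (letters_count_input : List Int) (out : Int) : Decidable (Spec_calculate_max_wellness_of_string alphabet_size letters_count_input out) := by unfold Spec_calculate_max_wellness_of_string; infer_instance

-- ===== CLAIM (what is proved, stated in full; the proofs are below) =====
def Claim_equal_calculate_max_wellness_of_string : Prop := ∀ (alphabet_size : Int) (letters_count_input : List Int), Dom_calculate_max_wellness_of_string alphabet_size letters_count_input → Pre_calculate_max_wellness_of_string alphabet_size letters_count_input → Spec_calculate_max_wellness_of_string alphabet_size letters_count_input (calculate_max_wellness_of_string alphabet_size letters_count_input)

-- ===== LEMMAS AND PROOFS =====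

def pvInd (p x : Int) : Int := if x - p > 0 then 1 else 0

def pvRow (a : Int) (c : List Int) (p : Int) : List Int :=
  (PySem.List.pyRange 0 a 1).map (fun i => pvInd p (PySem.List.pyGetD c i 0))

def pvLayers (a : Int) (c : List Int) : List Int → Int → List (Int × List Int)
  | [], _ => []
  | v :: vs, p => (v - p, pvRow a c p) :: pvLayers a c vs v

def pvPairsCnt : List Int → Int
  | [] => 0
  | [_] => 0
  | x :: y :: t => (if x ≠ 0 ∧ y ≠ 0 then 1 else 0) + pvPairsCnt (y :: t)

def pvT : List Int → Int → Int → Int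
  | [], _, _ => 0
  | v :: vs, p, m => (if m > p then v - p else 0) + pvT vs v m

def pvHd : List Int → Bool
  | [] => false
  | x :: _ => x != 0

theorem pv_scan (h : Int) (row : List Int) : ∀ (u w : Int), 0 ≤ u →
    (let p := row.foldl
        (fun (uw : Int × Int) number =>
          if number ≠ 0 then (uw.1 + 1, uw.2)
          else (0, if uw.1 ≥ 1 then uw.2 + h * (uw.1 - 1) else uw.2))
        (u, w)
     if p.1 ≥ 1 then p.2 + h * (p.1 - 1) else p.2)
    = w + h * (max (u - 1) 0 + (if 1 ≤ u ∧ pvHd row then 1 else 0) + pvPairsCnt row) := by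
  induction row with
  | nil =>
    intro u w hu
    simp only [List.foldl_nil, pvHd, pvPairsCnt]
    by_cases h1 : u ≥ 1
    · have hmax : max (u - 1) 0 = u - 1 := by omega
      rw [hmax]
      simp [h1]
    · simp only [h1, if_false]
      have hmax : max (u - 1) 0 = 0 := by omega
      simp [hmax]
  | cons x t ih =>
    intro u w hu
    by_cases hx : x = 0
    · subst hx
      rw [List.foldl_cons]
      rw [show (if (0:Int) ≠ 0 then ((u, w).1 + 1, (u, w).2)
            else ((0:Int), if (u, w).1 ≥ 1 then (u, w).2 + h * ((u, w).1 - 1) else (u, w).2))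
          = ((0:Int), if u ≥ 1 then w + h * (u - 1) else w) from by norm_num]
      rw [ih 0 _ le_rfl]
      have h0 : max ((0:Int) - 1) 0 + (if (1:Int) ≤ 0 ∧ pvHd t = true then (1:Int) else 0) + pvPairsCnt t = pvPairsCnt t := by
        simp
      have hpc : pvPairsCnt (0 :: t) = pvPairsCnt t := by
        cases t with
        | nil => simp [pvPairsCnt]
        | cons y t' => simp [pvPairsCnt]
      have hhd : pvHd ((0:Int) :: t) = false := by simp [pvHd]
      rw [hhd]
      by_cases h1 : u ≥ 1
      · have hmax : max (u - 1) 0 = u - 1 := by omega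
        simp only [h1, if_true, hpc, hmax, Bool.false_eq_true, and_false, if_false]
        linear_combination h * h0
      · have hmax : max (u - 1) 0 = 0 := by omega
        simp only [h1, if_false, hpc, hmax, Bool.false_eq_true, and_false]
        linear_combination h * h0
    · rw [List.foldl_cons]
      rw [show (if x ≠ 0 then ((u, w).1 + 1, (u, w).2)
            else ((0:Int), if (u, w).1 ≥ 1 then (u, w).2 + h * ((u, w).1 - 1) else (u, w).2))
          = (u + 1, w) from by simp [hx]]
      rw [ih (u+1) w (by omega)]
      clear ih
      have harith : max (u + 1 - 1) 0 + (if (1:Int) ≤ u + 1 ∧ pvHd t = true then (1:Int) else 0) + pvPairsCnt t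
          = max (u - 1) 0 + (if (1:Int) ≤ u ∧ pvHd (x :: t) = true then (1:Int) else 0) + pvPairsCnt (x :: t) := by
        have hhd : pvHd (x :: t) = true := by simp [pvHd, hx]
        rw [hhd]
        cases t with
        | nil =>
          simp only [pvPairsCnt, pvHd]
          split_ifs <;> simp_all <;> omega
        | cons y t' =>
          have hpc : pvPairsCnt (x :: y :: t') = (if x ≠ 0 ∧ y ≠ 0 then (1:Int) else 0) + pvPairsCnt (y :: t') := rfl
          rw [hpc]
          have hhd2 : pvHd (y :: t') = (y != 0) := rfl
          rw [hhd2]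
          by_cases hy : y = 0
          · subst hy
            split_ifs <;> simp_all <;> omega
          · split_ifs <;> simp_all <;> omega
      linear_combination h * harith

theorem pv_sub_nat (hh : Int) (lc : List Int) (t : Nat) (hle : t ≤ lc.length) :
    ((PySem.List.pyRange 0 (t : Int) 1).foldl
        (fun l idx => PySem.List.pySetD l idx (PySem.List.pyGetD l idx 0 - hh)) lc).length = lc.length
    ∧ ∀ j : Nat,
      (j < t → ((PySem.List.pyRange 0 (t : Int) 1).foldl
        (fun l idx => PySem.List.pySetD l idx (PySem.List.pyGetD l idx 0 - hh)) lc).getD j 0 = lc.getD j 0 - hh)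
      ∧ (t ≤ j → ((PySem.List.pyRange 0 (t : Int) 1).foldl
        (fun l idx => PySem.List.pySetD l idx (PySem.List.pyGetD l idx 0 - hh)) lc).getD j 0 = lc.getD j 0) := by
  induction t with
  | zero =>
    simp [PySem.List.pyRange_one_eq_nil]
  | succ t ih =>
    obtain ⟨ihlen, ihget⟩ := ih (by omega)
    have hr : PySem.List.pyRange 0 (((t+1 : Nat) : Nat) : Int) 1
        = PySem.List.pyRange 0 (t:Int) 1 ++ [(t:Int)] := by
      push_cast
      exact PySem.List.pyRange_one_succ_right (by exact_mod_cast Nat.zero_le t)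
    rw [hr, List.foldl_append]
    set L := (PySem.List.pyRange 0 (t : Int) 1).foldl
        (fun l idx => PySem.List.pySetD l idx (PySem.List.pyGetD l idx 0 - hh)) lc with hL
    simp only [List.foldl_cons, List.foldl_nil]
    rw [PySem.List.pySetD_natCast, PySem.List.pyGetD_natCast]
    have hLlen : L.length = lc.length := ihlen
    have htL : t < L.length := by omega
    refine ⟨by simp [List.length_set, hLlen], ?_⟩
    intro j
    constructor
    · intro hj
      by_cases hjt : j = t
      · subst hjt
        have h2 := (ihget j).2 le_rfl
        rw [List.getD_eq_getElem?_getD, List.getElem?_set_self (by omega), Option.getD_some, h2]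
      · have hjt' : j < t := by omega
        rw [List.getD_eq_getElem?_getD, List.getElem?_set_ne (by omega)]
        rw [← List.getD_eq_getElem?_getD]
        exact (ihget j).1 hjt'
    · intro hj
      rw [List.getD_eq_getElem?_getD, List.getElem?_set_ne (by omega)]
      rw [← List.getD_eq_getElem?_getD]
      exact (ihget j).2 (by omega)

theorem pv_sub (hh : Int) (lc : List Int) (a : Int) (hle : a ≤ (lc.length : Int)) :
    ((PySem.List.pyRange 0 a 1).foldl
        (fun l idx => PySem.List.pySetD l idx (PySem.List.pyGetD l idx 0 - hh)) lc).length = lc.length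
    ∧ ∀ i : Int, 0 ≤ i → i < a →
      PySem.List.pyGetD ((PySem.List.pyRange 0 a 1).foldl
        (fun l idx => PySem.List.pySetD l idx (PySem.List.pyGetD l idx 0 - hh)) lc) i 0
      = PySem.List.pyGetD lc i 0 - hh := by
  by_cases ha : a ≤ 0
  · rw [PySem.List.pyRange_one_eq_nil ha]
    exact ⟨rfl, fun i h1 h2 => by omega⟩
  · have hcast : a = ((a.toNat : Nat) : Int) := by omega
    rw [hcast]
    obtain ⟨hlen, hget⟩ := pv_sub_nat hh lc a.toNat (by omega)
    refine ⟨hlen, ?_⟩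
    intro i h1 h2
    have hi : i = ((i.toNat : Nat) : Int) := by omega
    rw [hi, PySem.List.pyGetD_natCast, PySem.List.pyGetD_natCast]
    exact (hget i.toNat).1 (by omega)

theorem pv_outer (a : Int) (c : List Int) (hle : a ≤ (c.length : Int)) :
    ∀ (vs : List Int) (lc : List Int) (mat0 : List (List Int)) (highs0 : List Int) (p : Int),
    lc.length = c.length →
    (∀ i : Int, 0 ≤ i → i < a → PySem.List.pyGetD lc i 0 = PySem.List.pyGetD c i 0 - p) →
    (vs.foldl
      (fun (s : List Int × List (List Int) × List Int × Int) high =>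
        let layer_high := high - s.2.2.2
        let row := (PySem.List.pyRange 0 a 1).map
          (fun idx => if PySem.List.pyGetD s.1 idx 0 > 0 then (1 : Int) else 0)
        let lc' := (PySem.List.pyRange 0 a 1).foldl
          (fun l idx => PySem.List.pySetD l idx (PySem.List.pyGetD l idx 0 - layer_high)) s.1
        (lc', s.2.1 ++ [row], s.2.2.1 ++ [layer_high], high))
      (lc, mat0, highs0, p)).2.1 = mat0 ++ (pvLayers a c vs p).map (·.2)
    ∧ (vs.foldl
      (fun (s : List Int × List (List Int) × List Int × Int) high =>
        let layer_high := high - s.2.2.2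
        let row := (PySem.List.pyRange 0 a 1).map
          (fun idx => if PySem.List.pyGetD s.1 idx 0 > 0 then (1 : Int) else 0)
        let lc' := (PySem.List.pyRange 0 a 1).foldl
          (fun l idx => PySem.List.pySetD l idx (PySem.List.pyGetD l idx 0 - layer_high)) s.1
        (lc', s.2.1 ++ [row], s.2.2.1 ++ [layer_high], high))
      (lc, mat0, highs0, p)).2.2.1 = highs0 ++ (pvLayers a c vs p).map (·.1) := by
  intro vs
  induction vs with
  | nil =>
    intro lc mat0 highs0 p hlen hinv
    simp [pvLayers]
  | cons v vs ih =>
    intro lc mat0 highs0 p hlen hinv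
    rw [List.foldl_cons]
    have hrow : (PySem.List.pyRange 0 a 1).map
        (fun idx => if PySem.List.pyGetD lc idx 0 > 0 then (1 : Int) else 0)
        = pvRow a c p := by
      apply List.map_congr_left
      intro i hi
      rw [PySem.List.mem_pyRange_one] at hi
      rw [hinv i hi.1 hi.2]
      simp [pvInd]
    have hstep : (let layer_high := v - (lc, mat0, highs0, p).2.2.2
        let row := (PySem.List.pyRange 0 a 1).map
          (fun idx => if PySem.List.pyGetD (lc, mat0, highs0, p).1 idx 0 > 0 then (1 : Int) else 0)
        let lc' := (PySem.List.pyRange 0 a 1).foldl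
          (fun l idx => PySem.List.pySetD l idx (PySem.List.pyGetD l idx 0 - layer_high)) (lc, mat0, highs0, p).1
        (lc', (lc, mat0, highs0, p).2.1 ++ [row], (lc, mat0, highs0, p).2.2.1 ++ [layer_high], v))
      = ((PySem.List.pyRange 0 a 1).foldl
          (fun l idx => PySem.List.pySetD l idx (PySem.List.pyGetD l idx 0 - (v - p))) lc,
         mat0 ++ [(PySem.List.pyRange 0 a 1).map
          (fun idx => if PySem.List.pyGetD lc idx 0 > 0 then (1 : Int) else 0)],
         highs0 ++ [v - p], v) := rfl
    rw [hstep, hrow]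
    obtain ⟨hlen', hget'⟩ := pv_sub (v - p) lc a (by omega)
    have hinv' : ∀ i : Int, 0 ≤ i → i < a →
        PySem.List.pyGetD ((PySem.List.pyRange 0 a 1).foldl
          (fun l idx => PySem.List.pySetD l idx (PySem.List.pyGetD l idx 0 - (v - p))) lc) i 0
        = PySem.List.pyGetD c i 0 - v := by
      intro i h1 h2
      rw [hget' i h1 h2, hinv i h1 h2]
      ring
    obtain ⟨h1, h2⟩ := ih _ (mat0 ++ [pvRow a c p]) (highs0 ++ [v - p]) v
      (by rw [hlen'] at *; omega) hinv'
    constructor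
    · rw [h1, List.append_assoc]
      simp [pvLayers]
    · rw [h2, List.append_assoc]
      simp [pvLayers]

theorem pv_final (L : List (Int × List Int)) :
    (PySem.List.pyRange 0 (((L.map (·.2)).length : Nat) : Int) 1).foldl
      (fun wellness idx =>
        let row := PySem.List.pyGetD (L.map (·.2)) idx []
        let h := PySem.List.pyGetD (L.map (·.1)) idx 0
        let p := row.foldl
          (fun (uw : Int × Int) number =>
            if number ≠ 0 then (uw.1 + 1, uw.2)
            else (0, if uw.1 ≥ 1 then uw.2 + h * (uw.1 - 1) else uw.2))
          ((0 : Int), wellness)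
        if p.1 ≥ 1 then p.2 + h * (p.1 - 1) else p.2)
      0
    = (L.map (fun l => l.1 * pvPairsCnt l.2)).sum := by
  rw [PySem.List.foldl_congr_mem
    (g := fun wellness idx =>
      wellness + (PySem.List.pyGetD (L.map (·.1)) idx 0)
        * pvPairsCnt (PySem.List.pyGetD (L.map (·.2)) idx []))]
  · rw [PySem.List.foldl_add]
    rw [zero_add]
    apply congrArg List.sum
    apply List.ext_getElem
    · simp [PySem.List.length_pyRange_one]
    · intro k h1 h2
      have hk : k < L.length := by
        simpa [PySem.List.length_pyRange_one] using h1
      simp only [List.getElem_map, PySem.List.getElem_pyRange_one, zero_add]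
      rw [PySem.List.pyGetD_natCast, PySem.List.pyGetD_natCast]
      rw [List.getD_eq_getElem?_getD, List.getElem?_eq_getElem (by simpa using hk)]
      rw [List.getD_eq_getElem?_getD, List.getElem?_eq_getElem (by simpa using hk)]
      simp
  · intro acc i hi
    rw [PySem.List.mem_pyRange_one] at hi
    rw [pv_scan _ _ 0 acc le_rfl]
    norm_num

theorem pv_row_take (a : Int) (c : List Int) (p : Int) (hle : a ≤ (c.length : Int)) :
    pvRow a c p = (c.take a.toNat).map (pvInd p) := by
  by_cases ha : a ≤ 0
  · rw [pvRow, PySem.List.pyRange_one_eq_nil ha, show a.toNat = 0 by omega]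
    simp
  · apply List.ext_getElem
    · simp [pvRow, PySem.List.length_pyRange_one]
      omega
    · intro k h1 h2
      have hk : k < a.toNat := by
        simpa [pvRow, PySem.List.length_pyRange_one] using h1
      have hkc : k < c.length := by omega
      simp only [pvRow, List.getElem_map, PySem.List.getElem_pyRange_one, zero_add,
        List.getElem_take]
      congr 1
      rw [PySem.List.pyGetD_natCast, List.getD_eq_getElem?_getD, List.getElem?_eq_getElem hkc]
      rfl

theorem pv_pairs_map (p : Int) (counts : List Int) :
    pvPairsCnt (counts.map (pvInd p))
    = ((counts.zip counts.tail).map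
        (fun pr => if p < min pr.1 pr.2 then (1 : Int) else 0)).sum := by
  induction counts with
  | nil => simp [pvPairsCnt]
  | cons x t ih =>
    cases t with
    | nil => simp [pvPairsCnt]
    | cons y t' =>
      have h1 : pvPairsCnt ((x :: y :: t').map (pvInd p))
          = (if pvInd p x ≠ 0 ∧ pvInd p y ≠ 0 then (1:Int) else 0)
            + pvPairsCnt ((y :: t').map (pvInd p)) := rfl
      rw [h1, ih]
      have h2 : (x :: y :: t').zip (x :: y :: t').tail
          = (x, y) :: ((y :: t').zip (y :: t').tail) := rfl
      rw [h2, List.map_cons, List.sum_cons]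
      congr 1
      by_cases hx : p < x <;> by_cases hy : p < y <;>
        simp [pvInd, hx, hy]

theorem pv_swap (a : Int) (c : List Int) (hle : a ≤ (c.length : Int)) :
    ∀ (vs : List Int) (p : Int),
    ((pvLayers a c vs p).map (fun l => l.1 * pvPairsCnt l.2)).sum
    = (((c.take a.toNat).zip (c.take a.toNat).tail).map
        (fun pr => pvT vs p (min pr.1 pr.2))).sum := by
  intro vs
  induction vs with
  | nil =>
    intro p
    simp [pvLayers, pvT]
  | cons v vs ih =>
    intro p
    have h1 : pvLayers a c (v :: vs) p = (v - p, pvRow a c p) :: pvLayers a c vs v := rfl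
    rw [h1, List.map_cons, List.sum_cons, ih v, pv_row_take a c p hle, pv_pairs_map]
    rw [← List.sum_map_mul_left]
    rw [← PySem.List.sum_map_add_int]
    apply congrArg List.sum
    apply List.map_congr_left
    intro pr _
    have hT : pvT (v :: vs) p (min pr.1 pr.2)
        = (if min pr.1 pr.2 > p then v - p else 0) + pvT vs v (min pr.1 pr.2) := rfl
    rw [hT]
    by_cases hp : p < min pr.1 pr.2 <;> simp [hp, gt_iff_lt]

theorem pv_getD_getElem (m : List Int) (j : Nat) (hj : j < m.length) :
    m.getD j 0 = m[j] := by
  rw [List.getD_eq_getElem?_getD, List.getElem?_eq_getElem hj, Option.getD_some]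

theorem pv_count_split (level : Int) (m : List Int) (k : Nat) (hk : k ≤ m.length)
    (h1 : ∀ j : Nat, j < m.length → j < k → m.getD j 0 ≤ level)
    (h2 : ∀ j : Nat, j < m.length → k ≤ j → level < m.getD j 0) :
    (m.countP (fun x => decide (level < x)) : Int) = (m.length : Int) - (k : Int) := by
  rw [← List.take_append_drop k m, List.countP_append]
  have ht : (m.take k).countP (fun x => decide (level < x)) = 0 := by
    rw [List.countP_eq_zero]
    intro x hx
    rw [List.mem_iff_getElem] at hx
    obtain ⟨q, hq, rfl⟩ := hx
    have hqk : q < k := by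
      have := List.length_take_le k m
      omega
    have hqm : q < m.length := by omega
    have := h1 q hqm hqk
    rw [pv_getD_getElem m q hqm] at this
    simp only [List.getElem_take]
    simpa using not_lt.2 this
  have hd : (m.drop k).countP (fun x => decide (level < x)) = (m.drop k).length := by
    rw [List.countP_eq_length]
    intro x hx
    rw [List.mem_iff_getElem] at hx
    obtain ⟨q, hq, rfl⟩ := hx
    have hqm : k + q < m.length := by
      have := List.length_drop (l := m) (i := k)
      omega
    have := h2 (k + q) hqm (by omega)
    rw [pv_getD_getElem m (k + q) hqm] at this
    simp only [List.getElem_drop]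
    simpa using this
  rw [ht, hd]
  simp only [List.length_append, List.length_take, List.length_drop]
  push_cast
  omega

theorem pvBisect_inv (minima : List Int) (level : Int)
    (hmono : ∀ p q : Nat, p ≤ q → q < minima.length → minima.getD p 0 ≤ minima.getD q 0) :
    ∀ (n : Nat) (lo hi : Int), (hi - lo).toNat = n → 0 ≤ lo → lo ≤ hi → hi ≤ (minima.length : Int) →
    (∀ j : Nat, j < minima.length → (j : Int) < lo → minima.getD j 0 ≤ level) →
    (∀ j : Nat, j < minima.length → hi ≤ (j : Int) → level < minima.getD j 0) →
    0 ≤ pvBisect minima level lo hi ∧ pvBisect minima level lo hi ≤ (minima.length : Int)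
      ∧ (∀ j : Nat, j < minima.length → (j : Int) < pvBisect minima level lo hi → minima.getD j 0 ≤ level)
      ∧ (∀ j : Nat, j < minima.length → pvBisect minima level lo hi ≤ (j : Int) → level < minima.getD j 0) := by
  intro n
  induction n using Nat.strong_induction_on with
  | _ n ih =>
  intro lo hi hn hlo0 hlohi hhil hbelow habove
  rw [pvBisect]
  by_cases h : lo < hi
  · rw [dif_pos h]
    have hb := PySem.Int.floordiv_two_mid_bounds (le_of_lt h)
    set mid := PySem.Int.floordiv (lo + hi) 2 with hmid
    have hmidlt : mid < hi := by
      have h2 : PySem.Int.floordiv (lo + hi) 2 < hi ↔ lo + hi < hi * 2 :=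
        PySem.Int.floordiv_lt_iff_lt_mul (by omega)
      omega
    have hmidlen : mid.toNat < minima.length := by omega
    have hget : PySem.List.pyGetD minima mid 0 = minima.getD mid.toNat 0 := by
      conv_lhs => rw [show mid = ((mid.toNat : Nat) : Int) from by omega,
        PySem.List.pyGetD_natCast]
    by_cases hc : PySem.List.pyGetD minima mid 0 ≤ level
    · rw [if_pos hc]
      rw [hget] at hc
      refine ih ((hi - (mid + 1)).toNat) (by omega) (mid + 1) hi rfl (by omega) (by omega) hhil
        ?_ habove
      intro j hj hjlt
      exact le_trans (hmono j mid.toNat (by omega) hmidlen) hc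
    · rw [if_neg hc]
      rw [hget] at hc
      refine ih ((mid - lo).toNat) (by omega) lo mid rfl hlo0 (by omega) (by omega) hbelow ?_
      intro j hj hjge
      exact lt_of_not_ge fun hle => hc (le_trans (hmono mid.toNat j (by omega) hj) hle)
  · rw [dif_neg h]
    have hlohi' : lo = hi := le_antisymm hlohi (not_lt.1 h)
    exact ⟨hlo0, by omega,
      fun j hj hjr => hbelow j hj hjr,
      fun j hj hjr => habove j hj (by omega)⟩

theorem pvBisect_count (minima : List Int) (level : Int)
    (hmono : ∀ p q : Nat, p ≤ q → q < minima.length → minima.getD p 0 ≤ minima.getD q 0) :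
    (minima.length : Int) - pvBisect minima level 0 (minima.length : Int)
      = ((minima.map (fun m => if level < m then (1 : Int) else 0)).sum) := by
  obtain ⟨hr0, hrl, hbelow, habove⟩ := pvBisect_inv minima level hmono
    (minima.length : Int).toNat 0 (minima.length : Int) (by omega) le_rfl (by omega) le_rfl
    (fun j hj hjlt => by omega) (fun j hj hjge => by omega)
  rw [show (fun m : Int => if level < m then (1 : Int) else 0)
      = (fun m : Int => if (fun x : Int => decide (level < x)) m = true then (1 : Int) else 0)
    from by funext m; simp]
  rw [PySem.List.sum_map_ite_one_zero]
  set r := pvBisect minima level 0 (minima.length : Int) with hr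
  have := pv_count_split level minima r.toNat (by omega)
    (fun j hj hjk => hbelow j hj (by omega))
    (fun j hj hjk => habove j hj (by omega))
  omega

theorem pv_fold (minima : List Int)
    (hmono : ∀ p q : Nat, p ≤ q → q < minima.length → minima.getD p 0 ≤ minima.getD q 0) :
    ∀ (vs : List Int) (t p : Int),
    (vs.foldl
      (fun (s : Int × Int) value =>
        (s.1 + (value - s.2) * ((minima.length : Int) - pvBisect minima s.2 0 (minima.length : Int)),
         value))
      (t, p)).1
    = t + (minima.map (fun m => pvT vs p m)).sum := by
  intro vs
  induction vs with
  | nil =>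
    intro t p
    simp [pvT]
  | cons v vs ih =>
    intro t p
    rw [List.foldl_cons]
    have hstep : ((t, p).1 + (v - (t, p).2) * ((minima.length : Int) - pvBisect minima (t, p).2 0 (minima.length : Int)), v)
        = (t + (v - p) * ((minima.length : Int) - pvBisect minima p 0 (minima.length : Int)), v) := rfl
    rw [hstep, ih]
    have hT : ∀ m : Int, pvT (v :: vs) p m = (if p < m then v - p else 0) + pvT vs v m := by
      intro m
      rfl
    have hmap : minima.map (fun m => pvT (v :: vs) p m)
        = minima.map (fun m => (if p < m then v - p else 0) + pvT vs v m) :=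
      List.map_congr_left (fun m _ => hT m)
    rw [hmap, PySem.List.sum_map_add_int minima (fun m => if p < m then v - p else 0)
      (fun m => pvT vs v m)]
    have hfac : minima.map (fun m => if p < m then v - p else 0)
        = minima.map (fun m => (v - p) * (if p < m then (1 : Int) else 0)) := by
      apply List.map_congr_left
      intro m _
      by_cases hp : p < m <;> simp [hp]
    rw [hfac, List.sum_map_mul_left, ← pvBisect_count minima p hmono]
    ring

theorem pv_main (a : Int) (c : List Int)
    (hpre : Pre_calculate_max_wellness_of_string a c) :
    calculate_max_wellness_of_string a c = calculate_max_wellness_of_string_alt a c := by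
  cases hc : c with
  | nil =>
    subst hc
    simp [calculate_max_wellness_of_string, calculate_max_wellness_of_string_alt,
      PySem.List.pyRange_one_eq_nil, PySem.List.slice, PySem.Set.ofList, PySem.List.sorted]
  | cons x xs =>
    rw [← hc]
    have hcne : c ≠ [] := by rw [hc]; simp
    have hlen1 : 1 ≤ c.length := by rw [hc]; simp
    have hle : a ≤ (c.length : Int) := by
      rcases hpre with h | h | h
      · omega
      · exact h
      · exact absurd h hcne
    obtain ⟨hmat, hhighs⟩ := pv_outer a c hle
      (PySem.List.sorted (PySem.Set.ofList c) (fun x => x) false) c [] [] 0 rfl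
      (fun i h1 h2 => by rw [sub_zero])
    simp only [List.nil_append] at hmat hhighs
    have hfin := pv_final (pvLayers a c
      (PySem.List.sorted (PySem.Set.ofList c) (fun x => x) false) 0)
    have hA : calculate_max_wellness_of_string a c
        = ((pvLayers a c
            (PySem.List.sorted (PySem.Set.ofList c) (fun x => x) false) 0).map
            (fun l => l.1 * pvPairsCnt l.2)).sum := by
      simp only [calculate_max_wellness_of_string]
      simp only [] at hmat hhighs hfin
      rw [hmat, hhighs, hfin]
    have hmono : ∀ p q : Nat, p ≤ q →
        q < (PySem.List.sorted (((c.take a.toNat).zip (c.take a.toNat).tail).map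
              (fun pr => min pr.1 pr.2)) (fun x => x) false).length →
        (PySem.List.sorted (((c.take a.toNat).zip (c.take a.toNat).tail).map
              (fun pr => min pr.1 pr.2)) (fun x => x) false).getD p 0
        ≤ (PySem.List.sorted (((c.take a.toNat).zip (c.take a.toNat).tail).map
              (fun pr => min pr.1 pr.2)) (fun x => x) false).getD q 0 := by
      intro p q hpq hq
      have hp : p < (PySem.List.sorted (((c.take a.toNat).zip (c.take a.toNat).tail).map
          (fun pr => min pr.1 pr.2)) (fun x => x) false).length := by omega
      rw [pv_getD_getElem _ p hp, pv_getD_getElem _ q hq]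
      exact PySem.List.sorted_id_getElem_mono _ hpq hq
    have hB : calculate_max_wellness_of_string_alt a c
        = ((PySem.List.sorted (((c.take a.toNat).zip (c.take a.toNat).tail).map
              (fun pr => min pr.1 pr.2)) (fun x => x) false).map
            (fun m => pvT (PySem.List.sorted (PySem.Set.ofList c) (fun x => x) false) 0 m)).sum := by
      simp only [calculate_max_wellness_of_string_alt]
      by_cases ha2 : a < 2
      · rw [if_pos ha2]
        have hzip : (c.take a.toNat).zip (c.take a.toNat).tail = [] := by
          have hlt : (c.take a.toNat).length ≤ 1 := by
            rw [List.length_take]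
            omega
          cases hct : c.take a.toNat with
          | nil => simp
          | cons y ys =>
            rw [hct] at hlt
            simp only [List.length_cons] at hlt
            have : ys = [] := List.eq_nil_of_length_eq_zero (by omega)
            subst this
            simp
        rw [hzip]
        simp [PySem.List.sorted]
      · rw [if_neg ha2]
        conv_lhs =>
          rw [show a = ((a.toNat : Nat) : Int) from by omega, PySem.List.slice_to_natCast,
            PySem.List.slice_from_one]
        rw [pv_fold _ hmono (PySem.List.sorted (PySem.Set.ofList c) (fun x => x) false) 0 0,
          zero_add]
    rw [hA, pv_swap a c hle, hB]
    rw [((PySem.List.sorted_perm (((c.take a.toNat).zip (c.take a.toNat).tail).map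
          (fun pr => min pr.1 pr.2)) (fun x => x) false).map
        (fun m => pvT (PySem.List.sorted (PySem.Set.ofList c) (fun x => x) false) 0 m)).sum_eq]
    rw [List.map_map]
    rfl

-- ===== VERDICT (by name: the statement is the Claim_ definition above) =====
theorem calculate_max_wellness_of_string_spec : Claim_equal_calculate_max_wellness_of_string := by
  intro a c _ hpre
  unfold Spec_calculate_max_wellness_of_string
  exact pv_main a c hpre
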